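-- pv_equiv track=rewrite | github.com/ankudinovaD/Hillel | diplom_project/person.py | format_age
-- ===== SOURCE A (Python) =====
-- def format_age(age: int) -> str:
--     if age is None:
--         return "Невідомий вік"
--     dict_name = {0: 'років', 1: 'рік', 2: 'роки', 3: 'роки', 4: 'роки', 5: 'років',
--                  6: 'років', 7: 'років', 8: 'років', 9: 'років', 11: 'років',
--                  12: 'років', 13: 'років', 14: 'років'}
--
--     year_value = ''
--     for key, value in dict_name.items():
--         if age % 100 == key and age % 100 in [11, 12, 13, 14]:
--             year_value = value
--         elif age % 10 == key:
--             year_value = value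
--     return f"{age} {year_value}"
-- ===== SOURCE B (Python) =====
-- def format_age(age: int) -> str:
--     if age is None:
--         return "Невідомий вік"
--     if age % 100 in (11, 12, 13, 14):
--         suffix = 'років'
--     elif age % 10 == 1:
--         suffix = 'рік'
--     elif age % 10 in (2, 3, 4):
--         suffix = 'роки'
--     else:
--         suffix = 'років'
--     return f"{age} {suffix}"
-- ===== Notes on version B (the rewrite author's own statement) =====
-- stated objective: simpler
-- what changed: Replaced the fourteen-entry lookup table and last-match-wins scan over dict items with three direct modular-arithmetic conditions (teens case on age mod one hundred, then the singular and paucal cases on the last digit).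
import Mathlib
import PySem

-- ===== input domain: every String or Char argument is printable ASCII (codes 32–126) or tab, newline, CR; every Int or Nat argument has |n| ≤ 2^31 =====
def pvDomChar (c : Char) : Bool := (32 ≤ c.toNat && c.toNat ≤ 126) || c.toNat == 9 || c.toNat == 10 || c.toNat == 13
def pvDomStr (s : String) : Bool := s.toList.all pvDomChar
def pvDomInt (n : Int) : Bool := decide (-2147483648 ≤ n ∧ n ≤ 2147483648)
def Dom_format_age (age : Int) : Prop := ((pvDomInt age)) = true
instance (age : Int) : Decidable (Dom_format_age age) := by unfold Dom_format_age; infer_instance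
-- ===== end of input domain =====

-- B is simpler: the lookup table and last-match-wins scan are replaced by three modular conditions.

-- ===== PORT A =====
-- the dict literal (distinct keys, insertion order) as an association list
def faDict : List (Int × String) :=
  [(0, "років"), (1, "рік"), (2, "роки"), (3, "роки"), (4, "роки"), (5, "років"),
   (6, "років"), (7, "років"), (8, "років"), (9, "років"), (11, "років"),
   (12, "років"), (13, "років"), (14, "років")]

def format_age (age : Int) : String :=
  let year_value := faDict.foldl (fun acc kv =>
    if PySem.Int.mod age 100 = kv.1 ∧ (PySem.Int.mod age 100 ∈ ([11, 12, 13, 14] : List Int)) then kv.2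
    else if PySem.Int.mod age 10 = kv.1 then kv.2
    else acc) ""
  PySem.Int.toStr age ++ " " ++ year_value

-- ===== PORT B =====
def format_age_alt (age : Int) : String :=
  let suffix :=
    if PySem.Int.mod age 100 ∈ ([11, 12, 13, 14] : List Int) then "років"
    else if PySem.Int.mod age 10 = 1 then "рік"
    else if PySem.Int.mod age 10 ∈ ([2, 3, 4] : List Int) then "роки"
    else "років"
  PySem.Int.toStr age ++ " " ++ suffix

-- ===== PRECONDITION & SPEC =====
def Spec_format_age (age : Int) (out : String) : Prop := out = format_age_alt age
instance (age : Int) (out : String) : Decidable (Spec_format_age age out) := by unfold Spec_format_age; infer_instance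

-- ===== CLAIM (what is proved, stated in full; the proofs are below) =====
def Claim_equal_format_age : Prop := ∀ (age : Int), Dom_format_age age → Spec_format_age age (format_age age)

-- ===== LEMMAS AND PROOFS =====
-- both programs depend on age only through age % 100 (age % 10 = (age % 100) % 10)
lemma fa_mod10_eq (age : Int) : PySem.Int.mod age 10 = PySem.Int.mod (PySem.Int.mod age 100) 10 := by
  rw [PySem.Int.mod_eq_emod_of_pos (a := age) (b := 10) (by norm_num),
      PySem.Int.mod_eq_emod_of_pos (a := age) (b := 100) (by norm_num),
      PySem.Int.mod_eq_emod_of_pos (a := age % 100) (b := 10) (by norm_num)]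
  omega

lemma fa_case (r : Int) (h0 : 0 ≤ r) (h1 : r < 100) :
    ∀ age : Int, PySem.Int.mod age 100 = r → format_age age = format_age_alt age := by
  intro age hr
  have h10 := fa_mod10_eq age
  rw [hr] at h10
  simp only [format_age, format_age_alt, hr, h10]
  congr 1
  interval_cases r <;> decide

-- ===== VERDICT (by name: the statement is the Claim_ definition above) =====
theorem format_age_spec : Claim_equal_format_age := by
  intro age _
  show format_age age = format_age_alt age
  exact fa_case (PySem.Int.mod age 100) (PySem.Int.mod_nonneg age (by norm_num))
    (PySem.Int.mod_lt age (by norm_num)) age rfl
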